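-- pv_equiv track=rewrite | github.com/HENRIETTA93/pythonProject | assigns/Y2021/t3unsw9021/sample/test.py | get_subset
-- ===== SOURCE A (Python) =====
-- from itertools import permutations
-- from itertools import permutations
--
-- def get_subset(sequence):
--     subset=[]
--     all_tuples_lst=[]
--     for i in range(1, len(sequence)+1):
--         ll=list(permutations(sequence,i))
--         all_tuples_lst+=ll
--     for t in all_tuples_lst:
--         subset.append(''.join(t))
--     return subset
-- ===== SOURCE B (Python) =====
-- def get_subset(sequence):
--     # Breadth-first: extend each partial permutation of the previous length by
--     # one unused element, instead of regenerating every length from scratch.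
--     out = []
--     frontier = [([], list(sequence))]
--     for _ in range(len(sequence)):
--         frontier = [(pre + [rem[j]], rem[:j] + rem[j + 1:])
--                     for pre, rem in frontier
--                     for j in range(len(rem))]
--         out += [''.join(pre) for pre, _ in frontier]
--     return out
-- ===== Notes on version B (the rewrite author's own statement) =====
-- stated objective: alternative
-- what changed: Replaces the per-length itertools.permutations regeneration with a single breadth-first pass that keeps (prefix, remaining) states and extends each partial permutation of the previous length by one unused element.
import Mathlib
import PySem

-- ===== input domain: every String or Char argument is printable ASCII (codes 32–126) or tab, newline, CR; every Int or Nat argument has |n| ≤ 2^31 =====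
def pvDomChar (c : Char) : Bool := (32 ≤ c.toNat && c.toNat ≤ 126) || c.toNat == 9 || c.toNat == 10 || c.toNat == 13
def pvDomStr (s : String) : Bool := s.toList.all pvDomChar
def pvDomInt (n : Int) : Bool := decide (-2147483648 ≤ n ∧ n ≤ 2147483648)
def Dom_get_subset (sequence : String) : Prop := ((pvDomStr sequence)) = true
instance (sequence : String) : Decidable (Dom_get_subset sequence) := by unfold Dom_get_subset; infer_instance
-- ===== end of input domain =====

-- B replaces per-length itertools.permutations regeneration with one breadth-first pass
-- extending (prefix, remaining) states; same output, alternative structure (not measured faster).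

-- ===== PORT A =====
-- helper: the recursive spec of itertools.permutations' selection order
-- (pick each element by original index, pair it with the remaining elements)
def pvSel : List Char → List (Char × List Char)
  | [] => []
  | x :: xs => (x, xs) :: (pvSel xs).map (fun p => (p.1, x :: p.2))

-- list(permutations(xs, r)) in itertools' lexicographic-by-index order
def pvPermsA : Nat → List Char → List (List Char)
  | 0, _ => [[]]
  | r + 1, xs => (pvSel xs).flatMap (fun p => (pvPermsA r p.2).map (fun q => p.1 :: q))

def get_subset (sequence : String) : List String :=
  let xs := sequence.toList
  -- for i in range(1, len(sequence)+1): all_tuples_lst += list(permutations(sequence, i))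
  let all_tuples_lst :=
    (PySem.List.pyRange 1 ((xs.length : Int) + 1) 1).foldl
      (fun acc i => acc ++ pvPermsA i.toNat xs) []
  -- for t in all_tuples_lst: subset.append(''.join(t))
  all_tuples_lst.foldl (fun subset t => subset ++ [String.mk t]) []

-- ===== PORT B =====
def get_subset_alt (sequence : String) : List String :=
  let xs := sequence.toList
  let st :=
    (List.range xs.length).foldl
      (fun (st : List String × List (List Char × List Char)) _ =>
        -- frontier = [(pre + [rem[j]], rem[:j] + rem[j+1:]) for pre, rem in frontier for j in range(len(rem))]
        let frontier := st.2.flatMap (fun pr =>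
          (List.range pr.2.length).map (fun j =>
            (pr.1 ++ [pr.2.getD j 'a'], pr.2.take j ++ pr.2.drop (j + 1))))
        -- out += [''.join(pre) for pre, _ in frontier]
        (st.1 ++ frontier.map (fun pr => String.mk pr.1), frontier))
      ([], [([], xs)])
  st.1

-- ===== PRECONDITION & SPEC =====
def Spec_get_subset (sequence : String) (out : List String) : Prop := out = get_subset_alt sequence
instance (sequence : String) (out : List String) : Decidable (Spec_get_subset sequence out) := by unfold Spec_get_subset; infer_instance

-- ===== CLAIM (what is proved, stated in full; the proofs are below) =====
def Claim_equal_get_subset : Prop := ∀ (sequence : String), Dom_get_subset sequence → Spec_get_subset sequence (get_subset sequence)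

-- ===== LEMMAS AND PROOFS =====

-- (prefix, remaining) pairs of all length-r partial permutations, in itertools order
def pvPairs : Nat → List Char → List (List Char × List Char)
  | 0, xs => [([], xs)]
  | r + 1, xs => (pvSel xs).flatMap (fun p => (pvPairs r p.2).map (fun q => (p.1 :: q.1, q.2)))

-- one breadth-first extension step (B's frontier update, in pvSel form)
def pvStep (fr : List (List Char × List Char)) : List (List Char × List Char) :=
  fr.flatMap (fun pr => (pvSel pr.2).map (fun q => (pr.1 ++ [q.1], q.2)))

theorem pvPermsA_eq_pairs (r : Nat) (xs : List Char) :
    pvPermsA r xs = (pvPairs r xs).map Prod.fst := by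
  induction r generalizing xs with
  | zero => simp [pvPermsA, pvPairs]
  | succ r ih => simp [pvPermsA, pvPairs, ih, List.map_flatMap, Function.comp_def]

theorem pvSel_idx (rem : List Char) :
    (List.range rem.length).map (fun j => (rem.getD j 'a', rem.take j ++ rem.drop (j + 1)))
      = pvSel rem := by
  induction rem with
  | nil => simp [pvSel]
  | cons x xs ih =>
    rw [List.length_cons, List.range_succ_eq_map]
    simp only [List.map_cons, List.map_map]
    rw [pvSel, ← ih, List.map_map]
    simp [Function.comp]

theorem pvStep_map_cons (c : Char) (l : List (List Char × List Char)) :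
    pvStep (l.map (fun q => (c :: q.1, q.2)))
      = (pvStep l).map (fun q => (c :: q.1, q.2)) := by
  simp [pvStep, List.flatMap_map, List.map_flatMap, List.map_map, Function.comp_def]

theorem pvFlatMapSingle {α β : Type} (f : α → β) (l : List α) :
    l.flatMap (fun x => [f x]) = l.map f := by
  induction l with
  | nil => rfl
  | cons a t ih => simp [ih]

theorem pvStep_pairs (r : Nat) (xs : List Char) :
    pvStep (pvPairs r xs) = pvPairs (r + 1) xs := by
  induction r generalizing xs with
  | zero => simp [pvStep, pvPairs, pvFlatMapSingle]
  | succ r ih =>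
    rw [pvPairs, pvStep, List.flatMap_assoc]
    rw [pvPairs]
    refine List.flatMap_congr (fun p _ => ?_)
    rw [← ih p.2]
    rw [← pvStep_map_cons p.1 (pvPairs r p.2)]
    simp [pvStep, List.flatMap_map]

-- B's literal frontier update equals pvStep
theorem pvFrontier_eq (fr : List (List Char × List Char)) :
    fr.flatMap (fun pr =>
        (List.range pr.2.length).map (fun j =>
          (pr.1 ++ [pr.2.getD j 'a'], pr.2.take j ++ pr.2.drop (j + 1))))
      = pvStep fr := by
  refine List.flatMap_congr (fun pr _ => ?_)
  have h := pvSel_idx pr.2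
  calc (List.range pr.2.length).map (fun j =>
          (pr.1 ++ [pr.2.getD j 'a'], pr.2.take j ++ pr.2.drop (j + 1)))
      = ((List.range pr.2.length).map
          (fun j => (pr.2.getD j 'a', pr.2.take j ++ pr.2.drop (j + 1)))).map
          (fun q => (pr.1 ++ [q.1], q.2)) := by simp [List.map_map, Function.comp]
    _ = (pvSel pr.2).map (fun q => (pr.1 ++ [q.1], q.2)) := by rw [h]

-- accumulated output after the first k levels
def pvOut (xs : List Char) : Nat → List String
  | 0 => []
  | k + 1 => pvOut xs k ++ (pvPairs (k + 1) xs).map (fun pr => String.mk pr.1)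

theorem pvBLoop (xs : List Char) (k : Nat) :
    (List.range k).foldl
      (fun (st : List String × List (List Char × List Char)) _ =>
        (st.1 ++ (st.2.flatMap (fun pr =>
          (List.range pr.2.length).map (fun j =>
            (pr.1 ++ [pr.2.getD j 'a'], pr.2.take j ++ pr.2.drop (j + 1))))).map (fun pr => String.mk pr.1),
         st.2.flatMap (fun pr =>
          (List.range pr.2.length).map (fun j =>
            (pr.1 ++ [pr.2.getD j 'a'], pr.2.take j ++ pr.2.drop (j + 1))))))
      ([], [([], xs)])
      = (pvOut xs k, pvPairs k xs) := by
  induction k with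
  | zero => simp [pvOut, pvPairs]
  | succ k ih =>
    rw [List.range_succ, List.foldl_append, ih]
    simp only [List.foldl_cons, List.foldl_nil]
    rw [pvFrontier_eq, pvStep_pairs]
    rfl

theorem pvFoldAppend {α β : Type} (f : α → β) (l : List α) (acc : List β) :
    l.foldl (fun s t => s ++ [f t]) acc = acc ++ l.map f := by
  induction l generalizing acc with
  | nil => simp
  | cons x xs ih => simp [ih]

theorem pvALoop (xs : List Char) (k : Nat) (acc : List (List Char)) :
    (List.range k).foldl (fun (a : List (List Char)) (j : Nat) => a ++ pvPermsA (1 + (j : Int)).toNat xs) acc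
      = acc ++ (List.range k).flatMap (fun j => pvPermsA (j + 1) xs) := by
  induction k generalizing acc with
  | zero => simp
  | succ k ih =>
    rw [List.range_succ, List.foldl_append, List.flatMap_append, ih]
    have : (1 + (k : Int)).toNat = k + 1 := by omega
    simp [this]

theorem pvOut_eq (xs : List Char) (k : Nat) :
    ((List.range k).flatMap (fun j => pvPermsA (j + 1) xs)).map String.mk = pvOut xs k := by
  induction k with
  | zero => simp [pvOut]
  | succ k ih =>
    rw [List.range_succ, List.flatMap_append, List.map_append, ih, pvOut]
    simp [pvPermsA_eq_pairs, List.map_map, Function.comp]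

-- ===== VERDICT (by name: the statement is the Claim_ definition above) =====
theorem get_subset_spec : Claim_equal_get_subset := by
  intro sequence _
  show get_subset sequence = get_subset_alt sequence
  simp only [get_subset, get_subset_alt]
  rw [pvBLoop]
  rw [PySem.List.pyRange_one]
  have hlen : (((sequence.toList.length : Int) + 1) - 1).toNat = sequence.toList.length := by omega
  rw [hlen, List.foldl_map, pvALoop, pvFoldAppend]
  simp [pvOut_eq]
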